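-- pv_equiv track=rewrite | github.com/jahnvi2204/SereNova-AI | backend/agent_service.py | _assess_crisis_level
-- ===== SOURCE A (Python) =====
-- from enum import Enum, auto
-- from typing import Any, Callable, Dict, List, Optional, Sequence, Tuple
--
-- class CrisisLevel(int, Enum):
--     NONE     = 0
--     LOW      = 1   # passive ideation / hopelessness
--     MODERATE = 2   # active ideation, no plan
--     HIGH     = 3   # active ideation + plan or access to means
--     IMMINENT = 4   # immediate danger
--
-- _CRISIS_LEVEL_KEYWORDS: Dict[CrisisLevel, List[str]] = {
--     CrisisLevel.IMMINENT: [
--         "going to kill myself", "about to end it", "have a gun", "have pills ready",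
--         "saying goodbye", "final note",
--     ],
--     CrisisLevel.HIGH: [
--         "suicide", "kill myself", "end my life", "want to die", "ending it all",
--         "plan to", "i will hurt",
--     ],
--     CrisisLevel.MODERATE: [
--         "self harm", "self-harm", "hurt myself", "can't go on", "no point",
--         "worthless", "better off dead",
--     ],
--     CrisisLevel.LOW: [
--         "hopeless", "trapped", "don't see a way out", "exhausted of living",
--         "nobody cares", "disappear",
--     ],
-- }
--
-- def _assess_crisis_level(text: str) -> CrisisLevel:
--     lower = text.lower()
--     for level in sorted(CrisisLevel, reverse=True):
--         if level == CrisisLevel.NONE: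
--             continue
--         if any(kw in lower for kw in _CRISIS_LEVEL_KEYWORDS.get(level, [])):
--             return level
--     return CrisisLevel.NONE
-- ===== SOURCE B (Python) =====
-- from enum import Enum
-- from typing import Dict, List
--
-- class CrisisLevel(int, Enum):
--     NONE     = 0
--     LOW      = 1
--     MODERATE = 2
--     HIGH     = 3
--     IMMINENT = 4
--
-- _CRISIS_LEVEL_KEYWORDS: Dict[CrisisLevel, List[str]] = {
--     CrisisLevel.IMMINENT: [
--         "going to kill myself", "about to end it", "have a gun", "have pills ready",
--         "saying goodbye", "final note",
--     ],
--     CrisisLevel.HIGH: [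
--         "suicide", "kill myself", "end my life", "want to die", "ending it all",
--         "plan to", "i will hurt",
--     ],
--     CrisisLevel.MODERATE: [
--         "self harm", "self-harm", "hurt myself", "can't go on", "no point",
--         "worthless", "better off dead",
--     ],
--     CrisisLevel.LOW: [
--         "hopeless", "trapped", "don't see a way out", "exhausted of living",
--         "nobody cares", "disappear",
--     ],
-- }
--
-- # single flat pass over all (level, keyword) pairs keeping a running maximum,
-- # instead of looping levels high-to-low with an early return
-- def _assess_crisis_level(text: str) -> CrisisLevel:
--     lower = text.lower()
--     best = CrisisLevel.NONE
--     for level, kws in _CRISIS_LEVEL_KEYWORDS.items():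
--         for kw in kws:
--             if kw in lower and level > best:
--                 best = level
--     return best
-- ===== Notes on version B (the rewrite author's own statement) =====
-- stated objective: alternative
-- what changed: Replaced the priority-ordered loop over levels with an early return and a per-level any() scan by one flat pass over all (level, keyword) pairs that maintains a running maximum matched level.
import Mathlib
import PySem

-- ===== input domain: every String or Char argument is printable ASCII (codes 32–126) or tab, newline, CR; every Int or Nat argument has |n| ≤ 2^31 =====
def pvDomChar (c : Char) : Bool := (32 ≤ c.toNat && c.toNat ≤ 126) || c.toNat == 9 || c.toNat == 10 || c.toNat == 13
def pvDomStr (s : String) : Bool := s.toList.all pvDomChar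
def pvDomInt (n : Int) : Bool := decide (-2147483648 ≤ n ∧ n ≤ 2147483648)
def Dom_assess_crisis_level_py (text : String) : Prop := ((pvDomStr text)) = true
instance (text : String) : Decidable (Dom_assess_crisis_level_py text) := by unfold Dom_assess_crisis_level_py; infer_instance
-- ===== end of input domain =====

-- B is an alternative of the same cost: one flat pass over (level, keyword) pairs with a
-- running maximum instead of a priority-ordered level loop with an early return.

-- ===== PORT A =====
-- _CRISIS_LEVEL_KEYWORDS.get(level, []) (levels are the ints 0..4)
def pvKwFor (level : Int) : List String :=
  if level == 4 then
    ["going to kill myself", "about to end it", "have a gun", "have pills ready",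
     "saying goodbye", "final note"]
  else if level == 3 then
    ["suicide", "kill myself", "end my life", "want to die", "ending it all",
     "plan to", "i will hurt"]
  else if level == 2 then
    ["self harm", "self-harm", "hurt myself", "can't go on", "no point",
     "worthless", "better off dead"]
  else if level == 1 then
    ["hopeless", "trapped", "don't see a way out", "exhausted of living",
     "nobody cares", "disappear"]
  else []

-- the 'for level in sorted(CrisisLevel, reverse=True)' loop with its early return
def pvLoopA (lower : String) : List Int → Int
  | [] => 0
  | l :: rest =>
    if l == 0 then pvLoopA lower rest
    else if (pvKwFor l).any (fun kw => PySem.Str.isIn kw lower) then l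
    else pvLoopA lower rest

def assess_crisis_level_py (text : String) : Int :=
  pvLoopA (PySem.Str.lower text) [4, 3, 2, 1, 0]

-- ===== PORT B =====
-- the flattened (level, keyword) pairs, in dict insertion order
def pvPairs : List (Int × String) :=
  [(4, "going to kill myself"), (4, "about to end it"), (4, "have a gun"),
   (4, "have pills ready"), (4, "saying goodbye"), (4, "final note"),
   (3, "suicide"), (3, "kill myself"), (3, "end my life"), (3, "want to die"),
   (3, "ending it all"), (3, "plan to"), (3, "i will hurt"),
   (2, "self harm"), (2, "self-harm"), (2, "hurt myself"), (2, "can't go on"),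
   (2, "no point"), (2, "worthless"), (2, "better off dead"),
   (1, "hopeless"), (1, "trapped"), (1, "don't see a way out"),
   (1, "exhausted of living"), (1, "nobody cares"), (1, "disappear")]

def assess_crisis_level_py_alt (text : String) : Int :=
  let lower := PySem.Str.lower text
  pvPairs.foldl
    (fun best p => if PySem.Str.isIn p.2 lower && decide (p.1 > best) then p.1 else best) 0

-- ===== PRECONDITION & SPEC =====
def Spec_assess_crisis_level_py (text : String) (out : Int) : Prop := out = assess_crisis_level_py_alt text
instance (text : String) (out : Int) : Decidable (Spec_assess_crisis_level_py text out) := by unfold Spec_assess_crisis_level_py; infer_instance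

-- ===== CLAIM (what is proved, stated in full; the proofs are below) =====
def Claim_equal_assess_crisis_level_py : Prop := ∀ (text : String), Dom_assess_crisis_level_py text → Spec_assess_crisis_level_py text (assess_crisis_level_py text)

-- ===== LEMMAS AND PROOFS =====

-- B's fold over one level's segment of pairs behaves like A's any() for that level
theorem pvSeg (lower : String) (l : Int) (kws : List String) (b : Int) :
    (kws.map (fun kw => (l, kw))).foldl
      (fun best p => if PySem.Str.isIn p.2 lower && decide (p.1 > best) then p.1 else best) b
    = if kws.any (fun kw => PySem.Str.isIn kw lower) && decide (l > b) then l else b := by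
  induction kws generalizing b with
  | nil => simp
  | cons kw rest ih =>
    simp only [List.map_cons, List.foldl_cons, List.any_cons, ih]
    rcases Bool.eq_false_or_eq_true (PySem.Str.isIn kw lower) with h | h <;>
      rcases Bool.eq_false_or_eq_true (rest.any fun kw => PySem.Str.isIn kw lower) with ha | ha <;>
        simp only [h, ha, Bool.true_and, Bool.false_and, Bool.and_true, Bool.and_false,
          Bool.true_or, Bool.false_or, Bool.or_true, Bool.or_false,
          if_true, if_false, Bool.false_eq_true, decide_eq_true_eq] <;>
        split_ifs <;> omega

theorem pvPairs_eq :
    pvPairs =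
      ((pvKwFor 4).map (fun kw => ((4 : Int), kw))) ++
      ((pvKwFor 3).map (fun kw => ((3 : Int), kw))) ++
      ((pvKwFor 2).map (fun kw => ((2 : Int), kw))) ++
      ((pvKwFor 1).map (fun kw => ((1 : Int), kw))) := by
  decide

-- ===== VERDICT (by name: the statement is the Claim_ definition above) =====
theorem assess_crisis_level_py_spec : Claim_equal_assess_crisis_level_py := by
  intro text _
  unfold Spec_assess_crisis_level_py assess_crisis_level_py assess_crisis_level_py_alt
  rw [pvPairs_eq]
  generalize PySem.Str.lower text = lower
  simp only [List.foldl_append, pvSeg, pvLoopA]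
  rcases Bool.eq_false_or_eq_true ((pvKwFor 4).any fun kw => PySem.Str.isIn kw lower) with h4 | h4 <;>
    rcases Bool.eq_false_or_eq_true ((pvKwFor 3).any fun kw => PySem.Str.isIn kw lower) with h3 | h3 <;>
      rcases Bool.eq_false_or_eq_true ((pvKwFor 2).any fun kw => PySem.Str.isIn kw lower) with h2 | h2 <;>
        rcases Bool.eq_false_or_eq_true ((pvKwFor 1).any fun kw => PySem.Str.isIn kw lower) with h1 | h1 <;>
          simp only [h4, h3, h2, h1] <;> norm_num
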